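-- pv_equiv track=rewrite | github.com/suksuki/bazi | core/insights.py | _find_periods
-- ===== SOURCE A (Python) =====
-- def _find_periods(series, threshold, condition="above"):
--     """
--     Returns list of tuples (start_idx, end_idx) where condition holds.
--     """
--     periods = []
--     in_period = False
--     start_idx = 0
--
--     for i, val in enumerate(series):
--         is_met = (val >= threshold) if condition == "above" else (val <= threshold)
--
--         if is_met:
--             if not in_period:
--                 start_idx = i
--                 in_period = True
--         else:
--             if in_period:
--                 # Period ended
--                 if i - start_idx >= 3: # Ignore blips < 3 units
--                     periods.append((start_idx, i-1))
--                 in_period = False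
--
--     # Close trailing
--     if in_period and (len(series) - start_idx >= 3):
--         periods.append((start_idx, len(series)-1))
--
--     return periods
-- ===== SOURCE B (Python) =====
-- def _find_periods(series, threshold, condition="above"):
--     met = [(v >= threshold) if condition == "above" else (v <= threshold) for v in series]
--     n = len(met)
--     periods = []
--     i = 0
--     while i < n:
--         if not met[i]:
--             i += 1
--             continue
--         j = i + 1
--         while j < n and met[j]:
--             j += 1
--         if j - i >= 3:
--             periods.append((i, j - 1))
--         i = j
--     return periods
-- ===== Notes on version B (the rewrite author's own statement) =====
-- stated objective: simpler
-- what changed: Replaced the in_period/start_idx state-flag scan with its separate trailing-close branch by a precomputed met-mask and a run-skipping two-level scan that emits each run of length>=3 uniformly.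
import Mathlib
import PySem

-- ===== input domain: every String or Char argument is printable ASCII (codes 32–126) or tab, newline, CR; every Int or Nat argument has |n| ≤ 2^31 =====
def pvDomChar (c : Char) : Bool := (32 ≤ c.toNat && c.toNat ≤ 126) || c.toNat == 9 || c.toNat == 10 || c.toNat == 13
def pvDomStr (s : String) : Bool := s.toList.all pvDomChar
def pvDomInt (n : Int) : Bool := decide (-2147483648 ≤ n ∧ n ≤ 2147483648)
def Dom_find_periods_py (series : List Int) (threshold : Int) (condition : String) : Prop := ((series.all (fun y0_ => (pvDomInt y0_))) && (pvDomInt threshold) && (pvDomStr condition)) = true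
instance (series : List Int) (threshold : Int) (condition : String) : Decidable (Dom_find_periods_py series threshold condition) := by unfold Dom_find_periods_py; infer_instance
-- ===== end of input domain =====

-- B replaces A's in_period/start_idx state-flag scan (with its separate trailing-close
-- branch) by a precomputed met-mask and a run-skipping scan; objective: simpler, same cost.

-- the `is_met` expression both Pythons evaluate for one element
def metF (threshold : Int) (condition : String) (v : Int) : Bool :=
  if condition == "above" then decide (v ≥ threshold) else decide (v ≤ threshold)

-- ===== PORT A =====
-- loop body of A: state = (periods, in_period, start_idx), element = (i, val)
def findPeriodsStep (threshold : Int) (condition : String)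
    (st : List (Int × Int) × Bool × Int) (p : Int × Int) : List (Int × Int) × Bool × Int :=
  let is_met := metF threshold condition p.2
  if is_met then
    if !st.2.1 then (st.1, true, p.1) else st
  else
    if st.2.1 then
      ((if p.1 - st.2.2 ≥ 3 then st.1 ++ [(st.2.2, p.1 - 1)] else st.1), false, st.2.2)
    else st

def find_periods_py (series : List Int) (threshold : Int) (condition : String) : List (Int × Int) :=
  let st := (PySem.List.enumerate series).foldl (findPeriodsStep threshold condition) ([], false, 0)
  if st.2.1 ∧ (series.length : Int) - st.2.2 ≥ 3 then
    st.1 ++ [(st.2.2, (series.length : Int) - 1)]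
  else st.1

-- ===== PORT B =====
-- run-skipping scan over the met-mask: skip a false, or consume a whole true-run
-- (the inner `while` advancing j in Source B is the takeWhile/dropWhile of the run)
def altRuns (i : Int) (bs : List Bool) : List (Int × Int) :=
  match bs with
  | [] => []
  | false :: rest => altRuns (i + 1) rest
  | true :: rest =>
      let len : Int := 1 + (rest.takeWhile (fun b => b)).length
      (if len ≥ 3 then [(i, i + len - 1)] else []) ++
        altRuns (i + len) (rest.dropWhile (fun b => b))
  termination_by bs.length
  decreasing_by
    · simp
    · simpa using Nat.lt_succ_of_le (List.length_dropWhile_le _ _)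

def find_periods_py_alt (series : List Int) (threshold : Int) (condition : String) : List (Int × Int) :=
  altRuns 0 (series.map (metF threshold condition))

-- ===== PRECONDITION & SPEC =====
def Spec_find_periods_py (series : List Int) (threshold : Int) (condition : String) (out : List (Int × Int)) : Prop := out = find_periods_py_alt series threshold condition
instance (series : List Int) (threshold : Int) (condition : String) (out : List (Int × Int)) : Decidable (Spec_find_periods_py series threshold condition out) := by unfold Spec_find_periods_py; infer_instance

-- ===== CLAIM (what is proved, stated in full; the proofs are below) =====
def Claim_equal_find_periods_py : Prop := ∀ (series : List Int) (threshold : Int) (condition : String), Dom_find_periods_py series threshold condition → Spec_find_periods_py series threshold condition (find_periods_py series threshold condition)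

-- ===== LEMMAS AND PROOFS =====

-- A's trailing-close step, abstracted over the total length n
def closeIt (n : Int) (st : List (Int × Int) × Bool × Int) : List (Int × Int) :=
  if st.2.1 ∧ n - st.2.2 ≥ 3 then st.1 ++ [(st.2.2, n - 1)] else st.1

-- B's behaviour from inside a run that started at index s, current position i
def runCont (s i : Int) (bs : List Bool) : List (Int × Int) :=
  let t : Int := (bs.takeWhile (fun b => b)).length
  (if i + t - s ≥ 3 then [(s, i + t - 1)] else []) ++
    altRuns (i + t) (bs.dropWhile (fun b => b))

theorem runCont_true_start (i : Int) (bs : List Bool) :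
    runCont i (i+1) bs = altRuns i (true :: bs) := by
  rw [runCont, altRuns]
  have h1 : (i + 1) + ((bs.takeWhile (fun b => b)).length : Int) - i
      = 1 + ((bs.takeWhile (fun b => b)).length : Int) := by ring
  have h3 : (i + 1) + ((bs.takeWhile (fun b => b)).length : Int)
      = i + (1 + ((bs.takeWhile (fun b => b)).length : Int)) := by ring
  simp only [h1, h3]
  split_ifs with p q <;> first | rfl | (exfalso; omega)

theorem runCont_true_cons (s i : Int) (bs : List Bool) :
    runCont s (i+1) bs = runCont s i (true :: bs) := by
  rw [runCont, runCont]
  simp only [List.takeWhile_cons, List.dropWhile_cons]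
  have h3 : (i + 1) + ((bs.takeWhile (fun b => b)).length : Int)
      = i + ((1 : Int) + (bs.takeWhile (fun b => b)).length) := by ring
  simp [h3]
  split_ifs with p q <;> first | rfl | (exfalso; omega) | (ring_nf)

theorem loop_lemma (th : Int) (c : String) (vs : List Int) :
    ∀ (i : Int) (acc : List (Int × Int)),
      (∀ s, closeIt (i + vs.length)
          ((PySem.List.enumerate vs i).foldl (findPeriodsStep th c) (acc, false, s))
          = acc ++ altRuns i (vs.map (metF th c)))
      ∧ (∀ s', closeIt (i + vs.length)
          ((PySem.List.enumerate vs i).foldl (findPeriodsStep th c) (acc, true, s'))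
          = acc ++ runCont s' i (vs.map (metF th c))) := by
  induction vs with
  | nil =>
    intro i acc
    refine ⟨fun s => ?_, fun s' => ?_⟩
    · simp [PySem.List.enumerate_nil, closeIt, altRuns]
    · by_cases h : (3:Int) ≤ i - s' <;>
        simp [PySem.List.enumerate_nil, closeIt, runCont, altRuns, h]
  | cons v rest ih =>
    intro i acc
    have hl : (i + (((v :: rest).length : Nat) : Int)) = (i+1) + (rest.length : Int) := by
      push_cast [List.length_cons]; ring
    rw [PySem.List.enumerate_cons]
    by_cases hm : metF th c v = true
    · refine ⟨fun s => ?_, fun s' => ?_⟩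
      · simp only [List.foldl_cons, findPeriodsStep, hm, if_true, Bool.not_false, Bool.false_eq_true, if_false, List.map_cons]
        rw [hl, ← runCont_true_start]
        exact (ih (i+1) acc).2 i
      · simp only [List.foldl_cons, findPeriodsStep, hm, if_true, Bool.not_true, Bool.false_eq_true, if_false, List.map_cons]
        rw [hl, ← runCont_true_cons]
        exact (ih (i+1) acc).2 s'
    · rw [Bool.not_eq_true] at hm
      refine ⟨fun s => ?_, fun s' => ?_⟩
      · simp only [List.foldl_cons, findPeriodsStep, hm, Bool.false_eq_true, if_false, List.map_cons]
        rw [hl]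
        rw [show altRuns i (false :: rest.map (metF th c)) = altRuns (i+1) (rest.map (metF th c)) from by rw [altRuns]]
        exact (ih (i+1) acc).1 s
      · simp only [List.foldl_cons, findPeriodsStep, hm, Bool.false_eq_true, if_false, List.map_cons]
        rw [hl]
        simp only [if_true]
        have h1 := (ih (i+1) (if i - s' ≥ 3 then acc ++ [(s', i - 1)] else acc)).1 s'
        rw [h1]
        by_cases h3 : (3:Int) ≤ i - s' <;>
          simp [runCont, altRuns, h3, List.append_assoc]

-- ===== VERDICT (by name: the statement is the Claim_ definition above) =====
theorem find_periods_py_spec : Claim_equal_find_periods_py := by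
  intro series threshold condition _
  unfold Spec_find_periods_py find_periods_py find_periods_py_alt
  have h := (loop_lemma threshold condition series 0 []).1 0
  simpa [closeIt, zero_add] using h
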